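-- pv_equiv track=rewrite | github.com/jnoms/SAT | sat/scripts/struc_disorder.py | find_disorder
-- ===== SOURCE A (Python) =====
-- def find_disorder(plddts, cutoff, n_sequential):
--     """
--     plddts is a list of residue-wise pLDDT values. This function returns a list lists,
--     where each sublist contains the 0-indexed positions of a stretch of residues that
--     is disordered.
--
--     A residue is considered disordered if it is in a stretch of at least n_sequential
--     residues that have a pLDDT of <= cutoff.
--     """
--
--     stretches = []
--     current_stretch = []
--
--     for i, value in enumerate(plddts):
--         if value <= cutoff:
--             current_stretch.append(i)
--         else:
--             if len(current_stretch) >= n_sequential: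
--                 stretches.append(current_stretch)
--             current_stretch = []
--
--     # Check for a valid stretch at the end of the list
--     if len(current_stretch) >= n_sequential:
--         stretches.append(current_stretch)
--
--     return stretches
-- ===== SOURCE B (Python) =====
-- def find_disorder(plddts, cutoff, n_sequential):
--     """
--     Boundary-based reformulation: indices of high-pLDDT residues (plus sentinels
--     -1 and len) delimit the low-pLDDT runs; each run is the open interval between
--     consecutive boundaries, kept when long enough.
--     """
--     n = len(plddts)
--     boundaries = [-1] + [i for i, v in enumerate(plddts) if v > cutoff] + [n]
--     return [list(range(a + 1, b))
--             for a, b in zip(boundaries, boundaries[1:])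
--             if b - a - 1 >= n_sequential]
-- ===== Notes on version B (the rewrite author's own statement) =====
-- stated objective: simpler
-- what changed: Replaces A's accumulate-and-flush loop (mutable current-stretch state with an end-of-list flush) by a boundary computation: collect the indices of above-cutoff residues plus sentinels -1 and len, pair consecutive boundaries with zip, keep gaps of sufficient length and emit each as a range.
import Mathlib
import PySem

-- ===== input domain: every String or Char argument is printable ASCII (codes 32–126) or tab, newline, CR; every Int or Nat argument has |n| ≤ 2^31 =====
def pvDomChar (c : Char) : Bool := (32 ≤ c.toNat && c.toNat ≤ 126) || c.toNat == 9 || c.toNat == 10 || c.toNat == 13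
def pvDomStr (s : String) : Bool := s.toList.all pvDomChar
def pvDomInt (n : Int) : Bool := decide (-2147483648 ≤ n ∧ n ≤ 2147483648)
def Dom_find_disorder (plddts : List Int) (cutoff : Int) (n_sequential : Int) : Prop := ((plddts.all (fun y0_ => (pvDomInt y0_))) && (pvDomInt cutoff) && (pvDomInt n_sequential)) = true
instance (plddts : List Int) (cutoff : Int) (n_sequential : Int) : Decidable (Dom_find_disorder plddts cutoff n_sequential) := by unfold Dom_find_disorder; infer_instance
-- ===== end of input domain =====

-- B replaces A's accumulate-and-flush loop by a boundary computation: the indices of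
-- high-pLDDT residues (plus sentinels) delimit the runs, which are built as ranges
-- between consecutive boundaries and filtered by length (objective: simpler).

-- ===== PORT A =====
def find_disorder (plddts : List Int) (cutoff : Int) (n_sequential : Int) : List (List Int) :=
  let r := (PySem.List.enumerate plddts).foldl
    (fun (st : List (List Int) × List Int) iv =>
      if iv.2 ≤ cutoff then (st.1, st.2 ++ [iv.1])
      else if n_sequential ≤ (st.2.length : Int) then (st.1 ++ [st.2], ([] : List Int))
      else (st.1, []))
    ([], [])
  if n_sequential ≤ (r.2.length : Int) then r.1 ++ [r.2] else r.1

-- ===== PORT B =====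
def find_disorder_alt (plddts : List Int) (cutoff : Int) (n_sequential : Int) : List (List Int) :=
  let n : Int := plddts.length
  let boundaries : List Int :=
    [-1] ++ ((PySem.List.enumerate plddts).filter (fun iv => decide (cutoff < iv.2))).map Prod.fst ++ [n]
  ((boundaries.zip boundaries.tail).filter (fun ab => decide (n_sequential ≤ ab.2 - ab.1 - 1))).map
    (fun ab => PySem.List.pyRange (ab.1 + 1) ab.2 1)

-- ===== PRECONDITION & SPEC =====
def Spec_find_disorder (plddts : List Int) (cutoff : Int) (n_sequential : Int) (out : List (List Int)) : Prop := out = find_disorder_alt plddts cutoff n_sequential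
instance (plddts : List Int) (cutoff : Int) (n_sequential : Int) (out : List (List Int)) : Decidable (Spec_find_disorder plddts cutoff n_sequential out) := by unfold Spec_find_disorder; infer_instance

-- ===== CLAIM (what is proved, stated in full; the proofs are below) =====
def Claim_equal_find_disorder : Prop := ∀ (plddts : List Int) (cutoff : Int) (n_sequential : Int), Dom_find_disorder plddts cutoff n_sequential → Spec_find_disorder plddts cutoff n_sequential (find_disorder plddts cutoff n_sequential)

-- ===== LEMMAS AND PROOFS =====

/-- Common recursive description of the run-splitting both programs perform:
`goFD c n i cur xs` is the list of kept runs of the remaining residues `xs`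
(whose first residue has index `i`), with `cur` the run in progress. -/
def goFD (c n : Int) (i : Int) (cur : List Int) : List Int → List (List Int)
  | [] => if n ≤ (cur.length : Int) then [cur] else []
  | v :: xs =>
      if v ≤ c then goFD c n (i + 1) (cur ++ [i]) xs
      else (if n ≤ (cur.length : Int) then [cur] else []) ++ goFD c n (i + 1) [] xs

theorem find_disorder_loop (c n : Int) :
    ∀ (xs : List Int) (i : Int) (acc : List (List Int)) (cur : List Int),
    (let r := (PySem.List.enumerate xs i).foldl
        (fun (st : List (List Int) × List Int) iv =>
          if iv.2 ≤ c then (st.1, st.2 ++ [iv.1])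
          else if n ≤ (st.2.length : Int) then (st.1 ++ [st.2], ([] : List Int))
          else (st.1, []))
        (acc, cur);
      if n ≤ (r.2.length : Int) then r.1 ++ [r.2] else r.1)
    = acc ++ goFD c n i cur xs := by
  intro xs
  induction xs with
  | nil =>
      intro i acc cur
      simp [PySem.List.enumerate_nil, goFD]
      split <;> simp
  | cons v xs ih =>
      intro i acc cur
      rw [PySem.List.enumerate_cons]
      simp only [List.foldl_cons, goFD]
      by_cases hv : v ≤ c
      · simp only [hv, if_pos]
        exact ih (i + 1) acc (cur ++ [i])
      · simp only [hv, if_false]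
        by_cases hn : n ≤ (cur.length : Int)
        · simp only [hn, if_pos]
          rw [ih (i + 1) (acc ++ [cur]) []]
          simp
        · simp only [hn, if_false]
          exact ih (i + 1) acc []

theorem find_disorder_alt_loop (c n : Int) :
    ∀ (xs : List Int) (i prev : Int), prev < i →
    (let L : List Int := prev :: ((PySem.List.enumerate xs i).filter
        (fun iv => decide (c < iv.2))).map Prod.fst ++ [i + xs.length];
      ((L.zip L.tail).filter (fun ab => decide (n ≤ ab.2 - ab.1 - 1))).map
        (fun ab => PySem.List.pyRange (ab.1 + 1) ab.2 1))
    = goFD c n i (PySem.List.pyRange (prev + 1) i 1) xs := by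
  intro xs
  induction xs with
  | nil =>
      intro i prev hpi
      have hlen : ((PySem.List.pyRange (prev + 1) i 1).length : Int) = i - prev - 1 := by
        rw [PySem.List.length_pyRange_one]; omega
      simp only [PySem.List.enumerate_nil, List.filter_nil, List.map_nil,
        List.length_nil, Nat.cast_zero, add_zero, List.singleton_append, List.tail_cons,
        List.zip_cons_cons, List.zip_nil_right, goFD, hlen]
      by_cases hn : n ≤ i - prev - 1
      · rw [if_pos hn, List.filter_cons, if_pos (decide_eq_true hn), List.filter_nil,
          List.map_cons, List.map_nil]
      · rw [if_neg hn, List.filter_cons, if_neg (by simpa using hn), List.filter_nil,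
          List.map_nil]
  | cons v xs ih =>
      intro i prev hpi
      have hlen : ((PySem.List.pyRange (prev + 1) i 1).length : Int) = i - prev - 1 := by
        rw [PySem.List.length_pyRange_one]; omega
      rw [PySem.List.enumerate_cons]
      by_cases hv : v ≤ c
      · -- low residue: extends the current run
        have hd : (decide (c < v)) = false := by simp only [decide_eq_false_iff_not]; omega
        have hIH := ih (i + 1) prev (by omega)
        simp only at hIH
        simp only [List.filter_cons, hd, Bool.false_eq_true, if_false, List.length_cons]
        rw [show ((i : Int) + ((xs.length + 1 : Nat) : Int)) = (i + 1) + (xs.length : Int) by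
          push_cast; ring]
        rw [hIH]
        simp only [goFD]
        rw [if_pos hv]
        congr 1
        rw [PySem.List.pyRange_one_succ_right (by omega)]
      · -- high residue: a boundary; flush the current run
        have hd : (decide (c < v)) = true := by simp only [decide_eq_true_eq]; omega
        have hIH := ih (i + 1) i (by omega)
        rw [PySem.List.pyRange_one_eq_nil (le_refl (i + 1))] at hIH
        simp only [List.cons_append, List.tail_cons] at hIH
        simp only [List.filter_cons, hd, if_true, List.map_cons, List.cons_append,
          List.tail_cons, List.zip_cons_cons, List.length_cons]
        rw [show ((i : Int) + ((xs.length + 1 : Nat) : Int)) = (i + 1) + (xs.length : Int) by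
          push_cast; ring]
        simp only [goFD]
        rw [if_neg hv, ← hIH, hlen]
        by_cases hn : n ≤ i - prev - 1
        · rw [if_pos hn, if_pos (decide_eq_true hn), List.map_cons, List.singleton_append]
        · rw [if_neg hn, if_neg (by simpa using hn), List.nil_append]

-- ===== VERDICT (by name: the statement is the Claim_ definition above) =====
theorem find_disorder_spec : Claim_equal_find_disorder := by
  intro plddts cutoff n_sequential _
  unfold Spec_find_disorder find_disorder find_disorder_alt
  have hA := find_disorder_loop cutoff n_sequential plddts 0 [] []
  have hB := find_disorder_alt_loop cutoff n_sequential plddts 0 (-1) (by omega)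
  simp only at hA hB
  rw [hA]
  rw [show ((0 : Int) + (plddts.length : Int)) = (plddts.length : Int) by omega] at hB
  rw [PySem.List.pyRange_one_eq_nil (by omega : (0:Int) ≤ -1 + 1)] at hB
  simp only [List.nil_append, List.singleton_append] at hB ⊢
  rw [hB]
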